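-- pv_equiv track=rewrite | github.com/nastyh/LeetCode | Basic Data Structures/Repeat_Length.py | repeatLength_back
-- ===== SOURCE A (Python) =====
-- def repeatLength_back(s, l):
--     bigl = [[s[0], 1]]
--     res = ''
--     for ch in s[1:]:
--         if bigl[-1][0] != ch:
--             # curr_count = 1
--             bigl.append([ch, 1])
--         else:
--             bigl[-1][1] += 1
--     for pair in bigl[::-1]:
--         if pair[1] < l:
--             res += pair[1] * pair[0]
--     return res[::-1]
-- ===== SOURCE B (Python) =====
-- def repeatLength_back(s, l):
--     out = []
--     i, n = 0, len(s)
--     while i < n: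
--         j = i
--         while j < n and s[j] == s[i]:
--             j += 1
--         if j - i < l:
--             out.append(s[i:j])
--         i = j
--     return ''.join(out)
-- ===== Notes on version B (the rewrite author's own statement) =====
-- stated objective: simpler
-- what changed: B replaces A's (char,count) run list with last-element mutation plus a reversed filtered rebuild and a final string reversal by a single forward two-pointer scan that slices each maximal run directly and joins the short ones.
import Mathlib
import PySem

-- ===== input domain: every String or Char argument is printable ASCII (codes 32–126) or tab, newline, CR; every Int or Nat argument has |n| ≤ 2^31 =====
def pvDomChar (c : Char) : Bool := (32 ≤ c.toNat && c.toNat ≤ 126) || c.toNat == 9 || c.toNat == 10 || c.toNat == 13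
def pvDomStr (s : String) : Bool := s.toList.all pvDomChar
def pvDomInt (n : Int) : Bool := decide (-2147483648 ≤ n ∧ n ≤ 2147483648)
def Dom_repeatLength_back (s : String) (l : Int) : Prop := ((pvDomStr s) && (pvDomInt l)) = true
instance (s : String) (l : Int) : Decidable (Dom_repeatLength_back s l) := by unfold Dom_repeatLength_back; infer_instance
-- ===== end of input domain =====

-- B replaces A's run list with last-element mutation, reversed filtered rebuild and final
-- reversal by one forward two-pointer scan joining the short runs directly (objective: simpler).

-- ===== PORT A =====
-- one loop step: 'if bigl[-1][0] != ch: bigl.append([ch,1]) else: bigl[-1][1] += 1'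
def pvStepA (bigl : List (Char × Int)) (ch : Char) : List (Char × Int) :=
  match bigl.getLast? with
  | none => bigl
  | some (c, n) =>
    if c != ch then bigl ++ [(ch, 1)]
    else bigl.dropLast ++ [(c, n + 1)]

-- one step of the second loop: 'if pair[1] < l: res += pair[1] * pair[0]'
def pvStepRes (l : Int) (res : List Char) (p : Char × Int) : List Char :=
  if p.2 < l then res ++ List.replicate p.2.toNat p.1 else res

def repeatLength_back (s : String) (l : Int) : String :=
  match s.toList with
  | [] => ""   -- Python raises IndexError at s[0] here; excluded by Pre_
  | c :: rest =>
    let bigl := rest.foldl pvStepA [(c, (1 : Int))]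
    let res := bigl.reverse.foldl (pvStepRes l) []
    String.ofList res.reverse   -- res[::-1]

-- ===== PORT B =====
-- forward two-pointer scan: each maximal run s[i:j] is kept iff its length < l
def pvScanB (l : Int) : List Char → List Char
  | [] => []
  | c :: rest =>
    let run := rest.takeWhile (· == c)
    let rest' := rest.dropWhile (· == c)
    (if ((1 : Int) + run.length < l) then c :: run else []) ++ pvScanB l rest'
termination_by cs => cs.length
decreasing_by
  simpa using Nat.lt_succ_of_le (List.length_dropWhile_le (· == c) rest)

def repeatLength_back_alt (s : String) (l : Int) : String :=
  String.ofList (pvScanB l s.toList)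

-- ===== PRECONDITION & SPEC =====
-- Pre_ excludes only the empty string, on which A raises IndexError at s[0].
def Pre_repeatLength_back (s : String) (l : Int) : Prop := s ≠ ""
instance (s : String) (l : Int) : Decidable (Pre_repeatLength_back s l) := by
  unfold Pre_repeatLength_back; infer_instance

def pvWitness_repeatLength_back : String × Int := ("aabcc", 2)

def Spec_repeatLength_back (s : String) (l : Int) (out : String) : Prop := out = repeatLength_back_alt s l
instance (s : String) (l : Int) (out : String) : Decidable (Spec_repeatLength_back s l out) := by unfold Spec_repeatLength_back; infer_instance

-- ===== CLAIM (what is proved, stated in full; the proofs are below) =====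
def Claim_equal_repeatLength_back : Prop := ∀ (s : String) (l : Int), Dom_repeatLength_back s l → Pre_repeatLength_back s l → Spec_repeatLength_back s l (repeatLength_back s l)

-- ===== LEMMAS AND PROOFS =====

-- the short-run piece contributed by one (char,count) pair of A
def pvPiece (l : Int) (p : Char × Int) : List Char :=
  if p.2 < l then List.replicate p.2.toNat p.1 else []

-- the run list A's first loop computes, as a direct recursion
def pvRunsA (c : Char) (n : Int) : List Char → List (Char × Int)
  | [] => [(c, n)]
  | ch :: cs => if c != ch then (c, n) :: pvRunsA ch 1 cs else pvRunsA c (n + 1) cs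

theorem pvStepA_ne_nil (b : List (Char × Int)) (ch : Char) (h : b ≠ []) :
    pvStepA b ch ≠ [] := by
  unfold pvStepA
  cases hb : b.getLast? with
  | none => simpa [hb] using h
  | some p => obtain ⟨c, n⟩ := p; simp only [hb]; split <;> simp

theorem pvStepA_prefix (pre b : List (Char × Int)) (ch : Char) (h : b ≠ []) :
    pvStepA (pre ++ b) ch = pre ++ pvStepA b ch := by
  unfold pvStepA
  rw [List.getLast?_append_of_ne_nil _ h]
  cases hb : b.getLast? with
  | none => simp [List.getLast?_eq_none_iff.mp hb] at h
  | some p =>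
    obtain ⟨c, n⟩ := p
    rw [List.dropLast_append_of_ne_nil h]
    simp only [hb]
    split <;> simp

theorem foldl_pvStepA_prefix (cs : List Char) (pre b : List (Char × Int)) (h : b ≠ []) :
    cs.foldl pvStepA (pre ++ b) = pre ++ cs.foldl pvStepA b := by
  induction cs generalizing b with
  | nil => rfl
  | cons ch cs ih =>
    simp only [List.foldl_cons, pvStepA_prefix pre b ch h]
    exact ih (pvStepA b ch) (pvStepA_ne_nil b ch h)

theorem foldl_pvStepA_runs (cs : List Char) (c : Char) (n : Int) :
    cs.foldl pvStepA [(c, n)] = pvRunsA c n cs := by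
  induction cs generalizing c n with
  | nil => rfl
  | cons ch cs ih =>
    simp only [List.foldl_cons, pvRunsA]
    by_cases h : c = ch
    · subst h
      simp only [bne_self_eq_false, if_neg Bool.false_ne_true]
      have : pvStepA [(c, n)] c = [(c, n + 1)] := by simp [pvStepA]
      rw [this, ih]
    · have hbne : (c != ch) = true := by simp [bne, h]
      simp only [hbne, if_pos rfl]
      have : pvStepA [(c, n)] ch = [(c, n)] ++ [(ch, 1)] := by
        simp [pvStepA, bne, h]
      rw [this, foldl_pvStepA_prefix cs [(c, n)] [(ch, 1)] (by simp), ih]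
      rfl

theorem foldl_pvStepRes (l : Int) (xs : List (Char × Int)) (acc : List Char) :
    xs.foldl (pvStepRes l) acc = acc ++ xs.flatMap (pvPiece l) := by
  induction xs generalizing acc with
  | nil => simp
  | cons p xs ih =>
    simp only [List.foldl_cons, List.flatMap_cons, ih, pvStepRes, pvPiece]
    split <;> simp

theorem pvRunsA_split (cs : List Char) (c : Char) (n : Int) :
    pvRunsA c n cs =
      (c, n + ((cs.takeWhile (· == c)).length : Int)) ::
        (match cs.dropWhile (· == c) with
         | [] => []
         | d :: ds => pvRunsA d 1 ds) := by
  induction cs generalizing n with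
  | nil => simp [pvRunsA]
  | cons ch cs ih =>
    by_cases h : c = ch
    · subst h
      simp only [pvRunsA, bne_self_eq_false, if_neg Bool.false_ne_true,
        List.takeWhile_cons, BEq.rfl, List.dropWhile_cons]
      rw [ih (n + 1)]
      congr 2
      push_cast [List.length_cons]
      ring
    · have hcc : (ch == c) = false := by simp [BEq.beq]; exact fun e => h e.symm
      have hbne : (c != ch) = true := by simp [bne, h]
      simp [pvRunsA, hbne, hcc]

theorem takeWhile_beq_replicate (cs : List Char) (c : Char) :
    cs.takeWhile (· == c) = List.replicate (cs.takeWhile (· == c)).length c := by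
  rw [List.eq_replicate_iff]
  exact ⟨rfl, fun b hb => by
    have := List.mem_takeWhile_imp hb
    simpa using this⟩

theorem pvMain (l : Int) (cs : List Char) (c : Char) :
    (pvRunsA c 1 cs).flatMap (pvPiece l) = pvScanB l (c :: cs) := by
  rw [pvRunsA_split]
  cases hd : cs.dropWhile (· == c) with
  | nil =>
    simp only [hd, List.flatMap_cons, List.flatMap_nil, List.append_nil]
    rw [pvScanB]
    simp only [hd, pvScanB, List.append_nil, pvPiece]
    have h1 : ((1 : Int) + ((cs.takeWhile (· == c)).length : Int)).toNat
        = 1 + (cs.takeWhile (· == c)).length := by omega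
    by_cases hl : (1 : Int) + ((cs.takeWhile (· == c)).length : Int) < l
    · rw [if_pos hl, if_pos hl, h1]
      rw [List.replicate_add, List.replicate_one]
      rw [← takeWhile_beq_replicate]
      rfl
    · rw [if_neg hl, if_neg hl]
  | cons d ds =>
    have hlen : ds.length < cs.length := by
      have h1 : (cs.dropWhile (· == c)).length ≤ cs.length :=
        List.length_dropWhile_le _ _
      rw [hd] at h1; simp at h1; omega
    simp only [hd, List.flatMap_cons]
    rw [pvMain l ds d]
    conv_rhs => rw [pvScanB]
    simp only [hd]
    congr 1
    simp only [pvPiece]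
    have h1 : ((1 : Int) + ((cs.takeWhile (· == c)).length : Int)).toNat
        = 1 + (cs.takeWhile (· == c)).length := by omega
    by_cases hl : (1 : Int) + ((cs.takeWhile (· == c)).length : Int) < l
    · rw [if_pos hl, if_pos hl, h1]
      rw [List.replicate_add, List.replicate_one]
      rw [← takeWhile_beq_replicate]
      rfl
    · rw [if_neg hl, if_neg hl]
termination_by cs.length

theorem pvPiece_reverse (l : Int) (p : Char × Int) :
    (pvPiece l p).reverse = pvPiece l p := by
  unfold pvPiece; split <;> simp

-- ===== VERDICT (by name: the statement is the Claim_ definition above) =====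
theorem repeatLength_back_spec : Claim_equal_repeatLength_back := by
  intro s l _ hpre
  unfold Spec_repeatLength_back repeatLength_back repeatLength_back_alt
  cases h : s.toList with
  | nil =>
    exact absurd (by simpa using congrArg String.ofList h) hpre
  | cons c rest =>
    simp only [foldl_pvStepA_runs, foldl_pvStepRes, List.nil_append]
    rw [List.reverse_flatMap]
    simp only [List.reverse_reverse]
    have hc : (List.reverse ∘ pvPiece l) = pvPiece l := funext (pvPiece_reverse l)
    rw [hc, pvMain l rest c]
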